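-- pv_equiv track=rewrite | github.com/lordmauve/weddinglights | lights/colors.py | hsv
-- ===== SOURCE A (Python) =====
-- def hsv(hue):
--     hue %= 360
--     h, i = divmod(hue, 60)
--     p = 0
--     q = 255 * (60 - i) // 60
--     t = 255 * i // 60
--     if h % 2 == 0:
--         vs = [255, t, p]
--     else:
--         vs = [q, 255, p]
--     for _ in range(int(h // 2)):
--         vs.insert(0, vs.pop())
--     return vs
-- ===== SOURCE B (Python) =====
-- def hsv(hue):
--     hue %= 360
--     h, i = divmod(hue, 60)
--     q = 255 * (60 - i) // 60
--     t = 255 * i // 60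
--     return [
--         [255, t, 0],
--         [q, 255, 0],
--         [0, 255, t],
--         [0, q, 255],
--         [t, 0, 255],
--         [255, 0, q],
--     ][int(h)]
-- ===== Notes on version B (the rewrite author's own statement) =====
-- stated objective: simpler
-- what changed: Replaces A's base-triple selection plus a pop/insert rotation loop with a direct six-entry table of RGB triples indexed by the sextant h = (hue%360)//60.
import Mathlib
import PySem

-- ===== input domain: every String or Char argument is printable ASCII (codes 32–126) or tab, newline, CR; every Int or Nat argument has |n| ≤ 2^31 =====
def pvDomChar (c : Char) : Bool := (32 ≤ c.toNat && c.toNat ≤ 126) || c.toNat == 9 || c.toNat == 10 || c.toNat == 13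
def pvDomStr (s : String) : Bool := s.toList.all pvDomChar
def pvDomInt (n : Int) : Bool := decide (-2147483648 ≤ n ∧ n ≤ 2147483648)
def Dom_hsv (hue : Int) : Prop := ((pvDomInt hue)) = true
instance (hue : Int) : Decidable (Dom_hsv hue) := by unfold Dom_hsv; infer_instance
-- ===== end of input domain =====

-- B replaces A's base-triple-plus-rotation loop by a direct six-way table indexed by the sextant (simpler decomposition; same values).

-- ===== PORT A =====
def hsv (hue : Int) : List Int :=
  let hue := PySem.Int.mod hue 360
  let h := PySem.Int.floordiv hue 60   -- h, i = divmod(hue, 60); divisor is the nonzero literal 60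
  let i := PySem.Int.mod hue 60
  let p : Int := 0
  let q := PySem.Int.floordiv (255 * (60 - i)) 60
  let t := PySem.Int.floordiv (255 * i) 60
  let vs := if PySem.Int.mod h 2 = 0 then [255, t, p] else [q, 255, p]
  (PySem.List.pyRange 0 (PySem.Int.floordiv h 2) 1).foldl
    (fun vs _ =>
      match PySem.List.pop? vs (-1) with   -- vs.pop(); vs always nonempty here
      | some (x, rest) => PySem.List.insert rest 0 x   -- vs.insert(0, x)
      | none => vs) vs

-- ===== PORT B =====
def hsv_alt (hue : Int) : List Int :=
  let r := PySem.Int.mod hue 360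
  let h := PySem.Int.floordiv r 60
  let i := PySem.Int.mod r 60
  let q := PySem.Int.floordiv (255 * (60 - i)) 60
  let t := PySem.Int.floordiv (255 * i) 60
  -- [...][int(h)]; h is always in 0..5 so the IndexError branch is unreachable
  (PySem.List.pyGet? [[255, t, 0], [q, 255, 0], [0, 255, t],
                      [0, q, 255], [t, 0, 255], [255, 0, q]] h).getD []

-- ===== PRECONDITION & SPEC =====
def Spec_hsv (hue : Int) (out : List Int) : Prop := out = hsv_alt hue
instance (hue : Int) (out : List Int) : Decidable (Spec_hsv hue out) := by unfold Spec_hsv; infer_instance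

-- ===== CLAIM (what is proved, stated in full; the proofs are below) =====
def Claim_equal_hsv : Prop := ∀ (hue : Int), Dom_hsv hue → Spec_hsv hue (hsv hue)

-- ===== LEMMAS AND PROOFS =====

theorem hsv_eq_alt (hue : Int) : hsv hue = hsv_alt hue := by
  unfold hsv hsv_alt
  have hr0 : 0 ≤ PySem.Int.mod hue 360 := PySem.Int.mod_nonneg hue (by norm_num)
  have hr1 : PySem.Int.mod hue 360 < 360 := PySem.Int.mod_lt hue (by norm_num)
  set r := PySem.Int.mod hue 360 with hrdef
  have hfd : PySem.Int.floordiv r 60 = r / 60 := PySem.Int.floordiv_eq_ediv_of_pos (by norm_num)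
  have h6 : PySem.Int.floordiv r 60 = 0 ∨ PySem.Int.floordiv r 60 = 1 ∨ PySem.Int.floordiv r 60 = 2 ∨ PySem.Int.floordiv r 60 = 3 ∨ PySem.Int.floordiv r 60 = 4 ∨ PySem.Int.floordiv r 60 = 5 := by rw [hfd] at *; omega
  rcases h6 with h | h | h | h | h | h <;> rw [hfd] at h <;>
    simp [h, PySem.Int.mod, PySem.List.pyRange, PySem.List.sliceIndices,
          PySem.List.pop?, PySem.List.insert, PySem.List.pyGet?, PySem.List.pyIdx?, List.range_succ]

-- ===== VERDICT (by name: the statement is the Claim_ definition above) =====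
theorem hsv_spec : Claim_equal_hsv := by
  intro hue _
  exact hsv_eq_alt hue
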